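-- pv_equiv track=rewrite | github.com/DragunWF/Competitive-Programming | CodeWars/python/6_kyu/madhav_array.py | is_madhav_array
-- ===== SOURCE A (Python) =====
-- def is_madhav_array(arr: list[int]) -> bool:
--     if len(arr) <= 1:
--         return False
--
--     current_len, current_max_len = 0, 2
--     current_sum = 0
--     for i in range(1, len(arr)):
--         current_sum += arr[i]
--         current_len += 1
--         if current_len == current_max_len:
--             if current_sum != arr[0]:
--                 return False
--             current_sum = 0
--             current_max_len += 1
--             current_len = 0
--         elif i + 1 == len(arr):
--             return False
--     return True
-- ===== SOURCE B (Python) =====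
-- def is_madhav_array(arr: list[int]) -> bool:
--     if len(arr) <= 1:
--         return False
--     target = arr[0]
--     rest = arr[1:]
--     size = 2
--     while rest:
--         if len(rest) < size:
--             return False
--         if sum(rest[:size]) != target:
--             return False
--         rest = rest[size:]
--         size += 1
--     return True
-- ===== Notes on version B (the rewrite author's own statement) =====
-- stated objective: simpler
-- what changed: B walks the array chunk-by-chunk with growing slices (take/drop of size 2,3,...) comparing each slice sum to the first element, instead of A's element-by-element loop maintaining three running counters and a last-index check.
import Mathlib
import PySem

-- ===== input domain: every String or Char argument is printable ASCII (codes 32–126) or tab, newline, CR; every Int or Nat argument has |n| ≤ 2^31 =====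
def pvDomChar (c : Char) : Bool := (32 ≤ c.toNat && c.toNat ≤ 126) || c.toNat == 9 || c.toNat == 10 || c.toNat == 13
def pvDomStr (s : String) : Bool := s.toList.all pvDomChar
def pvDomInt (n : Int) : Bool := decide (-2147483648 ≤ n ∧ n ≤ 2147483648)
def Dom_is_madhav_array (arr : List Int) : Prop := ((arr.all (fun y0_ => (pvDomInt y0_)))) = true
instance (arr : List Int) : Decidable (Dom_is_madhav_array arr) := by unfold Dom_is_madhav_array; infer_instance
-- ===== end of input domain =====

-- B replaces A's three per-element running counters by a chunk-walking loop over slices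
-- (take/drop growing groups and compare each group sum to the first element); objective: simpler.

-- ===== PORT A =====
-- A's for-loop over i in range(1, len(arr)): structural recursion over the tail;
-- 'i + 1 == len(arr)' becomes 'the remaining tail after this element is empty'.
def loopA (t : Int) : List Int → Int → Int → Int → Bool
  | [], _, _, _ => true
  | x :: xs, cs, cl, cml =>
    let cs' := cs + x
    let cl' := cl + 1
    if cl' = cml then
      if cs' ≠ t then false
      else loopA t xs 0 0 (cml + 1)
    else if xs.isEmpty then false
    else loopA t xs cs' cl' cml

def is_madhav_array (arr : List Int) : Bool :=
  if arr.length ≤ 1 then false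
  else
    match arr with
    | [] => false
    | a :: rest => loopA a rest 0 0 2

-- ===== PORT B =====
-- B's while loop; the counter k carries size = k + 2 (size starts at 2 and only
-- grows), which also makes termination evident.  rest[:size] = take, rest[size:] = drop.
def loopB (t : Int) (rest : List Int) (k : Nat) : Bool :=
  if h : rest.isEmpty then true
  else if rest.length < k + 2 then false
  else if (rest.take (k + 2)).sum ≠ t then false
  else loopB t (rest.drop (k + 2)) (k + 1)
termination_by rest.length
decreasing_by
  simp only [List.length_drop]
  cases rest with
  | nil => simp at h
  | cons y ys => simp only [List.length_cons]; omega

def is_madhav_array_alt (arr : List Int) : Bool :=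
  if arr.length ≤ 1 then false
  else
    match arr with
    | [] => false
    | a :: rest => loopB a rest 0

-- ===== PRECONDITION & SPEC =====
def Spec_is_madhav_array (arr : List Int) (out : Bool) : Prop := out = is_madhav_array_alt arr
instance (arr : List Int) (out : Bool) : Decidable (Spec_is_madhav_array arr out) := by unfold Spec_is_madhav_array; infer_instance

-- ===== CLAIM (what is proved, stated in full; the proofs are below) =====
def Claim_equal_is_madhav_array : Prop := ∀ (arr : List Int), Dom_is_madhav_array arr → Spec_is_madhav_array arr (is_madhav_array arr)

-- ===== LEMMAS AND PROOFS =====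

-- One chunk of A's element-by-element loop equals one take/drop step of B.
theorem loopA_chunk : ∀ (rest : List Int) (t cs cl cml : Int) (k : Nat),
    rest ≠ [] → 1 ≤ k → cl + k = cml →
    loopA t rest cs cl cml =
      (if rest.length < k then false
       else if cs + (rest.take k).sum ≠ t then false
       else loopA t (rest.drop k) 0 0 (cml + 1)) := by
  intro rest
  induction rest with
  | nil => intro _ _ _ _ _ h; exact absurd rfl h
  | cons x xs ih =>
    intro t cs cl cml k _ hk hcml
    match k, hk with
    | 1, _ =>
      have hcl : cl + 1 = cml := by omega
      simp [loopA, hcl, add_comm]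
    | (k' + 2), _ =>
      have hne : ¬ (cl + 1 = cml) := by push_cast at hcml; omega
      cases xs with
      | nil =>
        have hlen : (([x] : List Int)).length < k' + 2 := by simp
        simp [loopA, hne]
      | cons y ys =>
        have h2 : (cl + 1) + ((k' + 1 : Nat) : Int) = cml := by
          push_cast at hcml ⊢; omega
        have hrec := ih t (cs + x) (cl + 1) cml (k' + 1) (by simp) (by omega) h2
        have hstep : loopA t (x :: y :: ys) cs cl cml = loopA t (y :: ys) (cs + x) (cl + 1) cml := by
          simp [loopA, hne]
        rw [hstep, hrec]
        simp only [List.length_cons, List.take_succ_cons, List.drop_succ_cons, List.sum_cons]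
        by_cases hl : ys.length + 1 < k' + 1
        · rw [if_pos hl, if_pos (show ys.length + 1 + 1 < k' + 2 by omega)]
        · rw [if_neg hl, if_neg (show ¬ ys.length + 1 + 1 < k' + 2 by omega),
              show cs + (x + (y + (List.take k' ys).sum)) = cs + x + (y + (List.take k' ys).sum)
                from by ring]

theorem loopA_eq_loopB : ∀ (n : Nat) (rest : List Int), rest.length ≤ n →
    ∀ (t : Int) (k : Nat), loopA t rest 0 0 ((k : Int) + 2) = loopB t rest k := by
  intro n
  induction n with
  | zero =>
    intro rest hlen t k
    have : rest = [] := by cases rest <;> simp_all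
    subst this
    simp [loopA, loopB]
  | succ n ih =>
    intro rest hlen t k
    cases rest with
    | nil => simp [loopA, loopB]
    | cons x xs =>
      rw [loopB]
      rw [loopA_chunk (x :: xs) t 0 0 ((k : Int) + 2) (k + 2) (by simp) (by omega)
            (by push_cast; ring)]
      have hd : ((x :: xs).drop (k + 2)).length ≤ n := by
        simp only [List.length_drop]; simp at hlen ⊢; omega
      have hcast : ((k : Int) + 2) + 1 = ((k + 1 : Nat) : Int) + 2 := by push_cast; ring
      rw [hcast, ih _ hd t (k + 1)]
      simp

-- ===== VERDICT (by name: the statement is the Claim_ definition above) =====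
theorem is_madhav_array_spec : Claim_equal_is_madhav_array := by
  intro arr _
  unfold Spec_is_madhav_array is_madhav_array is_madhav_array_alt
  by_cases h : arr.length ≤ 1
  · rw [if_pos h, if_pos h]
  · rw [if_neg h, if_neg h]
    cases arr with
    | nil => simp at h
    | cons a rest => simpa using loopA_eq_loopB rest.length rest le_rfl a 0
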